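-- pv_equiv track=rewrite | github.com/BraCR10/TEC_Assigments-Intro-Taller-SI | 18_4_24/sumaSinCeros.py | sumasinceros_colaux
-- ===== SOURCE A (Python) =====
-- def sumasinceros_colaux(n1,n2,a,b,c,d):
--
--     if n1==0 and n2==0:# finalizacion
--         return c+d #
--     elif n1%10==0 and n2%10==0:
--
--        return sumasinceros_colaux(n1//10,n2//10,a,b,c,d)
--        #
--
--     elif n1%10==0 and n2%10!=0:
--
--         return sumasinceros_colaux(n1//10,n2//10,a,b+1,c,(d+(n2%10*10**b)))
--
--     elif n1%10!=0 and n2%10==0: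
--
--         return sumasinceros_colaux(n1//10,n2//10,a+1,b,(c+(n1%10*10**a)),d)
--
--
--     else:
--
--         return sumasinceros_colaux(n1//10,n2//10,a+1,b+1,(c+(n1%10*10**a)),(d+(n2%10*10**b)))
-- ===== SOURCE B (Python) =====
-- def _strip0(n):
--     # value of n with its zero digits removed (0 if all digits are zero)
--     r, p = 0, 1
--     while n > 0:
--         dgt = n % 10
--         if dgt:
--             r += dgt * p
--             p *= 10
--         n //= 10
--     return r
--
-- def sumasinceros_colaux(n1, n2, a, b, c, d):
--     return c + _strip0(n1) * 10**a + d + _strip0(n2) * 10**b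
-- ===== Notes on version B (the rewrite author's own statement) =====
-- stated objective: simpler
-- what changed: Replaces A's six-way coupled tail recursion with interleaved accumulators by two independent zero-stripping while-loops and one closed-form combination c + strip(n1)*10**a + d + strip(n2)*10**b.
-- outside the precondition, e.g. on sumasinceros_colaux(10, 10, 0, -3, 13, 10): A returns 24.000999999999998, B returns 24.001; on sumasinceros_colaux(0, 0, -1, 0, 5, 5): A returns 10, B returns 10.0; on sumasinceros_colaux(-3, 5, 0, 0, 0, 0): A raises RecursionError, B returns 5
import Mathlib
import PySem

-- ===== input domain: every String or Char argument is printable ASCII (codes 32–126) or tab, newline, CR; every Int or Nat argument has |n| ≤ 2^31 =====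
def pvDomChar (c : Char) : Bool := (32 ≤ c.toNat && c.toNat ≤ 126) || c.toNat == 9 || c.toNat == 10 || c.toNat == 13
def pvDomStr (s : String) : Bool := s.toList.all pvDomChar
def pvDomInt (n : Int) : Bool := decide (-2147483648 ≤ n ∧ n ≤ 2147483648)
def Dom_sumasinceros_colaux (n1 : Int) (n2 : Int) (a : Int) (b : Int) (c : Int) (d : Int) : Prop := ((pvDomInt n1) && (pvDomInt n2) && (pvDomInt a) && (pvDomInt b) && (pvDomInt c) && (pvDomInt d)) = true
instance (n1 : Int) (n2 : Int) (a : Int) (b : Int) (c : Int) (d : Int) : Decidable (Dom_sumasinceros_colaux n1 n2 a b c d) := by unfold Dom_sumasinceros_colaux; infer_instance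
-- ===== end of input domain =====

-- B replaces A's six-way coupled tail recursion by two independent zero-stripping loops
-- plus one closed-form combination (objective: simpler). Equivalence is on the return value.

-- `x // 10` with the positive divisor 10; cited by pvStrip0Loop's decreasing_by
theorem pvFdiv10 (n : Int) : PySem.Int.floordiv n 10 = n / 10 :=
  PySem.Int.floordiv_eq_ediv_of_pos (by norm_num)

-- ===== PORT A =====
-- A's recursion never terminates for a negative argument (Python: RecursionError), so the
-- port carries a fuel counter ≥ the number of recursion steps on every input Pre_ admits;
-- `10**a` is ported as `10 ^ a.toNat`, exact for 0 ≤ a (Pre_; Python yields a float otherwise).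
def pvAuxA : Nat → Int → Int → Int → Int → Int → Int → Int
  | 0, _, _, _, _, c, d => c + d
  | fuel+1, n1, n2, a, b, c, d =>
    if n1 = 0 ∧ n2 = 0 then c + d
    else if PySem.Int.mod n1 10 = 0 ∧ PySem.Int.mod n2 10 = 0 then
      pvAuxA fuel (PySem.Int.floordiv n1 10) (PySem.Int.floordiv n2 10) a b c d
    else if PySem.Int.mod n1 10 = 0 ∧ PySem.Int.mod n2 10 ≠ 0 then
      pvAuxA fuel (PySem.Int.floordiv n1 10) (PySem.Int.floordiv n2 10) a (b+1) c
        (d + PySem.Int.mod n2 10 * 10 ^ b.toNat)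
    else if PySem.Int.mod n1 10 ≠ 0 ∧ PySem.Int.mod n2 10 = 0 then
      pvAuxA fuel (PySem.Int.floordiv n1 10) (PySem.Int.floordiv n2 10) (a+1) b
        (c + PySem.Int.mod n1 10 * 10 ^ a.toNat) d
    else
      pvAuxA fuel (PySem.Int.floordiv n1 10) (PySem.Int.floordiv n2 10) (a+1) (b+1)
        (c + PySem.Int.mod n1 10 * 10 ^ a.toNat) (d + PySem.Int.mod n2 10 * 10 ^ b.toNat)

def sumasinceros_colaux (n1 : Int) (n2 : Int) (a : Int) (b : Int) (c : Int) (d : Int) : Int :=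
  pvAuxA (n1.natAbs + n2.natAbs + 1) n1 n2 a b c d

-- ===== PORT B =====
-- the `while n > 0` loop of Source B's _strip0, state (n, r, p)
def pvStrip0Loop (n r p : Int) : Int :=
  if h : 0 < n then
    let dgt := PySem.Int.mod n 10
    if dgt ≠ 0 then pvStrip0Loop (PySem.Int.floordiv n 10) (r + dgt * p) (p * 10)
    else pvStrip0Loop (PySem.Int.floordiv n 10) r p
  else r
termination_by n.toNat
decreasing_by
  all_goals
    rw [pvFdiv10]
    omega

def pvStrip0 (n : Int) : Int := pvStrip0Loop n 0 1

def sumasinceros_colaux_alt (n1 : Int) (n2 : Int) (a : Int) (b : Int) (c : Int) (d : Int) : Int :=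
  c + pvStrip0 n1 * 10 ^ a.toNat + d + pvStrip0 n2 * 10 ^ b.toNat

-- ===== PRECONDITION & SPEC =====
-- Pre_ excludes negative n1/n2, on which A recurses forever (RecursionError), and negative
-- a/b, on which 10**a / 10**b makes the results floats, not ints (except the degenerate
-- all-zero-digit corner, where A returns an int but B still produces a float).
def Pre_sumasinceros_colaux (n1 : Int) (n2 : Int) (a : Int) (b : Int) (c : Int) (d : Int) : Prop :=
  0 ≤ n1 ∧ 0 ≤ n2 ∧ 0 ≤ a ∧ 0 ≤ b
instance (n1 : Int) (n2 : Int) (a : Int) (b : Int) (c : Int) (d : Int) : Decidable (Pre_sumasinceros_colaux n1 n2 a b c d) := by unfold Pre_sumasinceros_colaux; infer_instance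

def pvWitness_sumasinceros_colaux : Int × Int × Int × Int × Int × Int := (102, 30, 0, 1, 5, -2)

def Spec_sumasinceros_colaux (n1 : Int) (n2 : Int) (a : Int) (b : Int) (c : Int) (d : Int) (out : Int) : Prop := out = sumasinceros_colaux_alt n1 n2 a b c d
instance (n1 : Int) (n2 : Int) (a : Int) (b : Int) (c : Int) (d : Int) (out : Int) : Decidable (Spec_sumasinceros_colaux n1 n2 a b c d out) := by unfold Spec_sumasinceros_colaux; infer_instance

-- ===== CLAIM (what is proved, stated in full; the proofs are below) =====
def Claim_equal_sumasinceros_colaux : Prop := ∀ (n1 : Int) (n2 : Int) (a : Int) (b : Int) (c : Int) (d : Int), Dom_sumasinceros_colaux n1 n2 a b c d → Pre_sumasinceros_colaux n1 n2 a b c d → Spec_sumasinceros_colaux n1 n2 a b c d (sumasinceros_colaux n1 n2 a b c d)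

-- ===== LEMMAS AND PROOFS =====

-- `x % 10` with the positive divisor 10
theorem pvMod10 (n : Int) : PySem.Int.mod n 10 = n % 10 :=
  PySem.Int.mod_eq_emod_of_pos (by norm_num)

-- one unfolding of the loop, with // already rewritten to /
theorem pvStrip0Loop_eq (n r p : Int) :
    pvStrip0Loop n r p =
      if 0 < n then
        (if PySem.Int.mod n 10 ≠ 0 then pvStrip0Loop (n / 10) (r + PySem.Int.mod n 10 * p) (p * 10)
         else pvStrip0Loop (n / 10) r p)
      else r := by
  rw [pvStrip0Loop]
  by_cases h : 0 < n <;> simp [h]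

-- accumulator elimination for the loop: running it from (r, p) is r + p · (run from (0, 1))
theorem pvStrip0Loop_shift (k : Nat) : ∀ (n r p : Int), n.toNat ≤ k →
    pvStrip0Loop n r p = r + p * pvStrip0 n := by
  induction k with
  | zero =>
    intro n r p hk
    have hn : ¬ 0 < n := by omega
    rw [pvStrip0, pvStrip0Loop_eq n r p, pvStrip0Loop_eq n 0 1, if_neg hn, if_neg hn]; ring
  | succ k ih =>
    intro n r p hk
    by_cases hn : 0 < n
    · have hlt : (n / 10).toNat ≤ k := by omega
      rw [pvStrip0, pvStrip0Loop_eq n r p, pvStrip0Loop_eq n 0 1, if_pos hn, if_pos hn]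
      by_cases hd : PySem.Int.mod n 10 ≠ 0
      · rw [if_pos hd, if_pos hd, ih _ _ _ hlt, ih _ _ _ hlt]; ring
      · rw [if_neg hd, if_neg hd, ih _ _ _ hlt, ih _ _ _ hlt]; ring
    · rw [pvStrip0, pvStrip0Loop_eq n r p, pvStrip0Loop_eq n 0 1, if_neg hn, if_neg hn]; ring

-- one digit step of the stripped value, for 0 ≤ n (also covers n = 0)
theorem pvStrip0_step (n : Int) (hn : 0 ≤ n) :
    pvStrip0 n = (if PySem.Int.mod n 10 = 0 then 0 else PySem.Int.mod n 10)
      + (if PySem.Int.mod n 10 = 0 then 1 else 10) * pvStrip0 (n / 10) := by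
  by_cases h : 0 < n
  · rw [pvStrip0, pvStrip0Loop_eq, if_pos h]
    by_cases hd : PySem.Int.mod n 10 = 0
    · rw [if_neg (not_not_intro hd), if_pos hd, if_pos hd, pvStrip0]; ring
    · rw [if_pos hd, if_neg hd, if_neg hd,
          pvStrip0Loop_shift (n / 10).toNat _ _ _ le_rfl]; ring
  · have hz : n = 0 := by omega
    subst hz
    have hm : PySem.Int.mod 0 10 = 0 := by rw [pvMod10]; norm_num
    have h0 : (0 : Int) / 10 = 0 := by norm_num
    rw [hm, h0, if_pos rfl, if_pos rfl]; ring

theorem pvAuxA_closed (fuel : Nat) :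
    ∀ (n1 n2 a b c d : Int), 0 ≤ n1 → 0 ≤ n2 → 0 ≤ a → 0 ≤ b →
      n1.natAbs + n2.natAbs < fuel →
      pvAuxA fuel n1 n2 a b c d
        = c + pvStrip0 n1 * 10 ^ a.toNat + d + pvStrip0 n2 * 10 ^ b.toNat := by
  induction fuel with
  | zero => intro n1 n2 a b c d _ _ _ _ hlt; omega
  | succ fuel ih =>
    intro n1 n2 a b c d h1 h2 ha hb hlt
    by_cases hz : n1 = 0 ∧ n2 = 0
    · obtain ⟨e1, e2⟩ := hz
      subst e1; subst e2
      have hs : pvStrip0 0 = 0 := by rw [pvStrip0, pvStrip0Loop]; norm_num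
      rw [pvAuxA, if_pos ⟨rfl, rfl⟩, hs]; ring
    · -- the recursive step: both quotients stay nonnegative, the natAbs sum drops
      have hq1 : 0 ≤ n1 / 10 := by omega
      have hq2 : 0 ≤ n2 / 10 := by omega
      have hd1 : (n1 / 10).natAbs + (n2 / 10).natAbs < fuel := by
        have hnz : n1 ≠ 0 ∨ n2 ≠ 0 := by
          rcases eq_or_ne n1 0 with e1 | e1
          · exact Or.inr fun e2 => hz ⟨e1, e2⟩
          · exact Or.inl e1
        omega
      have hs1 := pvStrip0_step n1 h1
      have hs2 := pvStrip0_step n2 h2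
      have hpa : (a + 1).toNat = a.toNat + 1 := by omega
      have hpb : (b + 1).toNat = b.toNat + 1 := by omega
      rw [pvAuxA, if_neg hz]
      simp only [pvFdiv10]
      by_cases hm1 : PySem.Int.mod n1 10 = 0 <;> by_cases hm2 : PySem.Int.mod n2 10 = 0
      · rw [if_pos ⟨hm1, hm2⟩, ih _ _ _ _ _ _ hq1 hq2 ha hb hd1]
        rw [hs1, hs2]; simp only [if_pos hm1, if_pos hm2]; ring
      · rw [if_neg (by tauto), if_pos ⟨hm1, hm2⟩,
            ih _ _ _ _ _ _ hq1 hq2 ha (by omega) hd1]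
        rw [hs1, hs2]
        simp only [if_pos hm1, if_neg hm2, hpb, pow_succ]
        ring
      · rw [if_neg (by tauto), if_neg (by tauto), if_pos ⟨hm1, hm2⟩,
            ih _ _ _ _ _ _ hq1 hq2 (by omega) hb hd1]
        rw [hs1, hs2]
        simp only [if_neg hm1, if_pos hm2, hpa, pow_succ]
        ring
      · rw [if_neg (by tauto), if_neg (by tauto), if_neg (by tauto),
            ih _ _ _ _ _ _ hq1 hq2 (by omega) (by omega) hd1]
        rw [hs1, hs2]
        simp only [if_neg hm1, if_neg hm2, hpa, hpb, pow_succ]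
        ring

-- ===== VERDICT (by name: the statement is the Claim_ definition above) =====
theorem sumasinceros_colaux_spec : Claim_equal_sumasinceros_colaux := by
  intro n1 n2 a b c d _ hpre
  obtain ⟨h1, h2, ha, hb⟩ := hpre
  show sumasinceros_colaux n1 n2 a b c d = sumasinceros_colaux_alt n1 n2 a b c d
  rw [sumasinceros_colaux, sumasinceros_colaux_alt,
      pvAuxA_closed _ _ _ _ _ _ _ h1 h2 ha hb (by omega)]
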